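-- pv_equiv track=rewrite | github.com/xiaobo1992/cs57300 | dm-hw4/xiaobo_zhang/cluster.py | create_topic_feature
-- ===== SOURCE A (Python) =====
-- def create_topic_feature(result, frequency):
-- 	topic_features = list()
-- 	for i in range(50):
-- 		group = [x for x,y in enumerate(result) if y == i]
-- 		feature = list()
-- 		#adding words to cluster
-- 		for j in group:
-- 			feature.append(frequency[j])
-- 		topic_features.append(feature)
-- 	return topic_features
-- ===== SOURCE B (Python) =====
-- def create_topic_feature(result, frequency):
--     # single bucketing pass over zip(result, frequency) instead of 50 scans of result
--     topic_features = [[] for _ in range(50)]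
--     for label, feat in zip(result, frequency):
--         if 0 <= label < 50:
--             topic_features[label].append(feat)
--     return topic_features
-- ===== Notes on version B (the rewrite author's own statement) =====
-- stated objective: faster
-- what changed: replaced the 50 separate filter passes over result (one per topic label) with a single bucketing pass over zip(result, frequency) into 50 pre-allocated lists
import Mathlib
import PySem

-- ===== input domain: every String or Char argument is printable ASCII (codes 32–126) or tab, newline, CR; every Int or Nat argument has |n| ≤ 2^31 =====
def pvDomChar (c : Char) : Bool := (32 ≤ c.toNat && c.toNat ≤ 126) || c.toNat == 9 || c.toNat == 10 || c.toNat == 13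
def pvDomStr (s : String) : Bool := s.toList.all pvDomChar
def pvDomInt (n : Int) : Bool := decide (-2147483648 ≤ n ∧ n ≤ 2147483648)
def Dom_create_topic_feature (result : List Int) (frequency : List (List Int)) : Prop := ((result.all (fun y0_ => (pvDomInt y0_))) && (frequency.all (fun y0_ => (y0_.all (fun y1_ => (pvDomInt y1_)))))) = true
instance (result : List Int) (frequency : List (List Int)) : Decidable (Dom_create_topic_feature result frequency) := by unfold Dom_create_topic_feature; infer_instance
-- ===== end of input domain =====

-- B replaces A's 50 filter passes over `result` with one bucketing pass over zip(result, frequency) (constant-factor faster).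


-- ===== PORT A =====
-- for i in range(50): group = [x for x,y in enumerate(result) if y == i]; feature = [frequency[j] for j in the append loop]
def create_topic_feature (result : List Int) (frequency : List (List Int)) : List (List (List Int)) :=
  (PySem.List.pyRange 0 50 1).foldl (fun topic_features i =>
    let group := ((PySem.List.enumerate result).filter (fun p => p.2 == i)).map (fun p => p.1)
    let feature := group.foldl (fun f j => f ++ [PySem.List.pyGetD frequency j []]) []
    topic_features ++ [feature]) []

-- ===== PORT B =====
def create_topic_feature_alt (result : List Int) (frequency : List (List Int)) : List (List (List Int)) :=
  let init : List (List (List Int)) := (List.range 50).map (fun _ => [])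
  (result.zip frequency).foldl (fun topic_features p =>
    if 0 ≤ p.1 ∧ p.1 < 50 then topic_features.modify p.1.toNat (fun b => b ++ [p.2])
    else topic_features) init

-- ===== PRECONDITION & SPEC =====
-- Pre_ excludes exactly the inputs on which A raises IndexError: a position j with an
-- in-range label result[j] ∈ [0,50) but j ≥ len(frequency).
def Pre_create_topic_feature (result : List Int) (frequency : List (List Int)) : Prop :=
  ∀ k : Nat, (h : k < result.length) → (0 ≤ result[k] ∧ result[k] < 50) → k < frequency.length
instance (result : List Int) (frequency : List (List Int)) : Decidable (Pre_create_topic_feature result frequency) := by unfold Pre_create_topic_feature; infer_instance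
def pvWitness_create_topic_feature : List Int × List (List Int) := ([0, 60, 2, 2], [[1], [2], [3], [4]])

def Spec_create_topic_feature (result : List Int) (frequency : List (List Int)) (out : List (List (List Int))) : Prop := out = create_topic_feature_alt result frequency
instance (result : List Int) (frequency : List (List Int)) (out : List (List (List Int))) : Decidable (Spec_create_topic_feature result frequency out) := by unfold Spec_create_topic_feature; infer_instance

-- ===== CLAIM (what is proved, stated in full; the proofs are below) =====
def Claim_equal_create_topic_feature : Prop := ∀ (result : List Int) (frequency : List (List Int)), Dom_create_topic_feature result frequency → Pre_create_topic_feature result frequency → Spec_create_topic_feature result frequency (create_topic_feature result frequency)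
-- ===== LEMMAS AND PROOFS =====

theorem pv_side_a (i : Int) (hi0 : 0 ≤ i) (hi50 : i < 50) :
    ∀ (result : List Int) (s : Nat) (frequency : List (List Int)),
    (∀ p ∈ PySem.List.enumerate result (s : Int), (0 ≤ p.2 ∧ p.2 < 50) → p.1 < (frequency.length : Int)) →
    (((PySem.List.enumerate result (s : Int)).filter (fun p => p.2 == i)).map (fun p => p.1)).map
        (fun j => PySem.List.pyGetD frequency j []) =
      ((result.zip (frequency.drop s)).filter (fun p => p.1 == i)).map Prod.snd := by
  intro result
  induction result with
  | nil => intro s frequency _; simp [PySem.List.enumerate_nil]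
  | cons a as ih =>
    intro s frequency hpre
    by_cases hs : s < frequency.length
    · -- drop s frequency = frequency[s] :: drop (s+1)
      have hdrop : frequency.drop s = frequency[s] :: frequency.drop (s+1) :=
        List.drop_eq_getElem_cons hs
      rw [PySem.List.enumerate_cons, hdrop]
      have hcast : (s : Int) + 1 = ((s + 1 : Nat) : Int) := by push_cast; ring
      by_cases ha : a = i
      · simp only [List.filter_cons, List.zip_cons_cons, ha, beq_self_eq_true, reduceIte,
          List.map_cons, List.map_map]
        congr 1
        · rw [PySem.List.pyGetD_natCast, List.getD_eq_getElem?_getD, List.getElem?_eq_getElem hs]; rfl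
        · rw [← List.map_map, hcast]
          exact ih (s+1) frequency (by intro p hp; exact hpre p (by rw [PySem.List.enumerate_cons, hcast]; exact List.mem_cons_of_mem _ hp))
      · simp only [List.filter_cons, List.zip_cons_cons, beq_iff_eq, ha, reduceIte]
        rw [hcast]
        exact ih (s+1) frequency (by intro p hp; exact hpre p (by rw [PySem.List.enumerate_cons, hcast]; exact List.mem_cons_of_mem _ hp))
    · -- frequency exhausted: both sides are empty
      have hdrop : frequency.drop s = [] := List.drop_eq_nil_of_le (by omega)
      rw [hdrop]
      simp only [List.zip_nil_right, List.filter_nil, List.map_nil]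
      -- LHS: the filter is empty, since any p with p.2 = i would satisfy the precondition
      have hfil : (PySem.List.enumerate (a :: as) (s : Int)).filter (fun p => p.2 == i) = [] := by
        rw [List.filter_eq_nil_iff]
        intro p hp hpi
        rw [beq_iff_eq] at hpi
        have h1 : p.1 < (frequency.length : Int) := hpre p hp (by omega)
        obtain ⟨k, hk, rfl⟩ := (PySem.List.mem_enumerate_iff _ _ _).mp hp
        simp at h1; omega
      rw [hfil]; rfl
theorem pv_side_b :
    ∀ (l : List (Int × List Int)) (B : List (List (List Int))), B.length = 50 →
    l.foldl (fun topic_features p =>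
      if 0 ≤ p.1 ∧ p.1 < 50 then topic_features.modify p.1.toNat (fun b => b ++ [p.2])
      else topic_features) B =
    (List.range 50).map (fun i => B.getD i [] ++ ((l.filter (fun p => p.1 == (i : Int))).map Prod.snd)) := by
  intro l
  induction l with
  | nil =>
    intro B hB
    simp only [List.foldl_nil, List.filter_nil, List.map_nil, List.append_nil]
    apply List.ext_getElem
    · simp [hB]
    · intro n h1 h2
      simp only [List.getElem_map, List.getElem_range]
      rw [List.getD_eq_getElem?_getD, List.getElem?_eq_getElem (by simp at h2 ⊢; omega)]
      rfl
  | cons p rest ih =>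
    intro B hB
    simp only [List.foldl_cons]
    by_cases hg : 0 ≤ p.1 ∧ p.1 < 50
    · rw [if_pos hg, ih _ (by simp [hB])]
      apply List.map_congr_left
      intro i hi
      simp only [List.mem_range] at hi
      rw [List.getD_eq_getElem?_getD, List.getElem?_eq_getElem (by simp [hB]; omega),
          List.getElem_modify]
      by_cases he : p.1 = (i : Int)
      · have htn : p.1.toNat = i := by omega
        rw [if_pos htn]
        simp only [List.filter_cons, he, beq_self_eq_true]
        rw [List.getD_eq_getElem?_getD, List.getElem?_eq_getElem (by omega)]
        simp
      · have htn : ¬ p.1.toNat = i := by omega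
        rw [if_neg htn]
        simp only [List.filter_cons]
        rw [if_neg (by simpa using he)]
        rw [List.getD_eq_getElem?_getD, List.getElem?_eq_getElem (by omega)]
    · rw [if_neg hg, ih _ hB]
      apply List.map_congr_left
      intro i hi
      simp only [List.mem_range] at hi
      have : ¬ (p.1 == (i : Int)) = true := by
        simp only [beq_iff_eq]
        intro h; apply hg; constructor <;> omega
      simp [this]

theorem main_spec (result : List Int) (frequency : List (List Int))
    (hpre : Pre_create_topic_feature result frequency) :
    create_topic_feature result frequency = create_topic_feature_alt result frequency := by
  unfold create_topic_feature create_topic_feature_alt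
  rw [PySem.List.foldl_append_singleton_eq_map
        (f := fun i => (((PySem.List.enumerate result).filter (fun p => p.2 == i)).map (fun p => p.1)).foldl
          (fun f j => f ++ [PySem.List.pyGetD frequency j []]) [])]
  rw [pv_side_b _ _ (by simp)]
  have h50 : (PySem.List.pyRange 0 50 1) = (List.range 50).map (fun k => ((k : Nat) : Int)) := by
    rw [show (50:Int) = ((50:Nat):Int) by norm_num]
    exact PySem.List.pyRange_zero_natCast 50
  rw [h50, List.map_map, List.nil_append]
  apply List.map_congr_left
  intro k hk
  simp only [List.mem_range] at hk
  simp only [Function.comp]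
  rw [PySem.List.foldl_append_singleton_eq_map, List.nil_append]
  have hinit : ((List.range 50).map (fun _ => ([] : List (List Int)))).getD k [] = [] := by
    rw [List.getD_eq_getElem?_getD, List.getElem?_eq_getElem (by simpa using hk)]
    simp only [Option.getD_some, List.getElem_map]
  rw [hinit, List.nil_append]
  have := pv_side_a (k : Int) (by omega) (by exact_mod_cast hk) result 0 frequency ?_
  · simpa using this
  · intro p hp hrange
    obtain ⟨j, hj, rfl⟩ := (PySem.List.mem_enumerate_iff _ _ _).mp (by simpa using hp)
    have := hpre j hj (by simpa using hrange)
    simp; omega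


-- ===== VERDICT (by name: the statement is the Claim_ definition above) =====
theorem create_topic_feature_spec : Claim_equal_create_topic_feature := by
  intro result frequency _ hpre
  unfold Spec_create_topic_feature
  exact main_spec result frequency hpre
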